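-- pv_equiv track=rewrite | github.com/sandeepkumar8713/pythonapps | 27_seventhFolder/31_process_scheduler.py | get_task_sequence
-- ===== SOURCE A (Python) =====
-- import functools
--
-- class Task:
--     def __init__(self, start_time, duration, priority, index):
--         self.start_time = start_time
--         self.duration = duration
--         self.priority = priority
--         self.index = index
--
-- def comparator(task_a, task_b):
--     priority_diff = task_a.priority - task_b.priority
--     start_time_diff = task_a.start_time - task_b.start_time
--     duration_diff = task_a.duration - task_b.duration
--     index_diff = task_a.index - task_b.index
--
--     if priority_diff != 0:
--         return -priority_diff
--     if start_time_diff != 0: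
--         return start_time_diff
--     if duration_diff != 0:
--         return duration_diff
--     return index_diff
--
-- def get_task_sequence(start_times, durations, priorities):
--     tasks = {}
--     n = len(start_times)
--     for i in range(n):
--         task = Task(start_times[i], durations[i], priorities[i], i)
--         if start_times[i] in tasks:
--             tasks[start_times[i]].append(task)
--         else:
--             tasks[start_times[i]] = [task]
--
--     result = []
--     left = min(start_times)
--     right = left
--     while len(tasks.keys()) != 0:
--         this_list = []
--         # Pick all the tasks whose start time is ready to execute
--         while left <= right:
--             if left in tasks:
--                 this_list.extend(tasks.get(left))
--                 del tasks[left]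
--             left += 1
--
--         this_result = sorted(this_list, key=functools.cmp_to_key(comparator))
--         exc_time = 0
--         for task in this_result:
--             result.append(task.index)
--             exc_time += task.duration
--         right += exc_time
--
--         if right < left:
--             right = left
--
--     return result
-- ===== SOURCE B (Python) =====
-- def get_task_sequence(start_times, durations, priorities):
--     # Sort tasks once by start time (stable); sweep with a pointer, jumping
--     # directly across gaps instead of stepping one time unit at a time.
--     tasks = sorted(zip(start_times, durations, priorities, range(len(start_times))),
--                    key=lambda t: t[0])
--     n = len(tasks)
--     result = []
--     k = 0
--     right = tasks[0][0]
--     while k < n: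
--         if tasks[k][0] > right:
--             right = tasks[k][0]          # jump straight to the next arrival
--         batch = []
--         while k < n and tasks[k][0] <= right:
--             batch.append(tasks[k])
--             k += 1
--         batch.sort(key=lambda t: (-t[2], t[0], t[1], t[3]))
--         for t in batch:
--             result.append(t[3])
--             right += t[1]
--     return result
-- ===== Notes on version B (the rewrite author's own statement) =====
-- stated objective: faster
-- what changed: Instead of grouping tasks in a dict and scanning every integer time point one by one (both across gaps and across each batch window), B sorts the tasks once by start time and sweeps them with a pointer, jumping directly to the next arrival time across gaps; the batch is gathered by the pointer and ordered by the tuple key (-priority, start, duration, index) instead of a cmp_to_key comparator.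
import Mathlib
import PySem

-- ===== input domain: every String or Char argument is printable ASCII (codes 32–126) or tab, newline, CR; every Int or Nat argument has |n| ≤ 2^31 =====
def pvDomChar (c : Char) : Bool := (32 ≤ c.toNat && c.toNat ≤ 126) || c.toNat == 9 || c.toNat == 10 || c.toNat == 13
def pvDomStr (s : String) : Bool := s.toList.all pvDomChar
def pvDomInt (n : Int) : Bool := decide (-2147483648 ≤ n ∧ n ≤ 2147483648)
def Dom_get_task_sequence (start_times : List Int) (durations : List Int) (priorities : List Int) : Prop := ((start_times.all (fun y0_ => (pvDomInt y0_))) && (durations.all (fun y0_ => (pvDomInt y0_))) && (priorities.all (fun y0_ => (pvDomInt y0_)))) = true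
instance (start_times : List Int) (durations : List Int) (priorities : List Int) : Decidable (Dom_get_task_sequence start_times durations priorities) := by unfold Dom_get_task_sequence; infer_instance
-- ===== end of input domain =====

-- B replaces A's dict-of-start-times plus one-integer-at-a-time clock scan by a single
-- stable sort by start time and a pointer sweep that jumps straight to the next arrival.

-- ===== PORT A =====
-- a Task object as a tuple (start_time, duration, priority, index)
abbrev PVTask : Type := Int × Int × Int × Int

def comparator (task_a task_b : PVTask) : Int :=
  let priority_diff := task_a.2.2.1 - task_b.2.2.1
  let start_time_diff := task_a.1 - task_b.1
  let duration_diff := task_a.2.1 - task_b.2.1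
  let index_diff := task_a.2.2.2 - task_b.2.2.2
  if priority_diff ≠ 0 then -priority_diff
  else if start_time_diff ≠ 0 then start_time_diff
  else if duration_diff ≠ 0 then duration_diff
  else index_diff

-- sorted(this_list, key=functools.cmp_to_key(comparator)): Python's stable sort under a
-- comparator, ported as the stable insertion sort PySem.List.sorted itself is defined by
-- (cf. PySem.List.sorted_eq_foldl_insertBy), with 'a before b' iff comparator a b < 0.
def sortA (l : List PVTask) : List PVTask :=
  l.foldl (fun acc t => PySem.List.insertBy (fun a b => decide (comparator a b < 0)) t acc) []

-- the inner 'while left <= right' loop: collect and delete every dict band in the window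
def innerA (tasks : PySem.Dict Int (List PVTask)) (this_list : List PVTask) (left right : Int) :
    PySem.Dict Int (List PVTask) × List PVTask × Int :=
  if h : left ≤ right then
    if tasks.contains left then
      innerA (tasks.erase left) (this_list ++ tasks.getD left []) (left + 1) right
    else innerA tasks this_list (left + 1) right
  else (tasks, this_list, left)
termination_by (right + 1 - left).toNat
decreasing_by all_goals omega

-- the outer 'while len(tasks.keys()) != 0' loop; fuel only makes the recursion total
-- (the computed fuel is proved sufficient in the lemmas below)
def outerA (fuel : Nat) (tasks : PySem.Dict Int (List PVTask)) (result : List Int)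
    (left right : Int) : List Int :=
  match fuel with
  | 0 => result
  | fuel' + 1 =>
    if tasks.size ≠ 0 then
      let s := innerA tasks [] left right
      let this_result := sortA s.2.1
      let p := this_result.foldl
        (fun (pr : List Int × Int) task => (pr.1 ++ [task.2.2.2], pr.2 + task.2.1)) (result, 0)
      let right' := right + p.2
      let left' := s.2.2
      let right'' := if right' < left' then left' else right'
      outerA fuel' s.1 p.1 left' right''
    else result

def get_task_sequence (start_times : List Int) (durations : List Int) (priorities : List Int) : List Int :=
  let n : Int := PySem.List.len start_times
  let tasks := (PySem.List.pyRange 0 n).foldl (fun d i =>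
      let task : PVTask := (PySem.List.pyGetD start_times i 0,
        (PySem.List.pyGetD durations i 0, (PySem.List.pyGetD priorities i 0, i)))
      if d.contains (PySem.List.pyGetD start_times i 0) then
        d.modify (PySem.List.pyGetD start_times i 0) [] (fun l => l ++ [task])
      else d.insert (PySem.List.pyGetD start_times i 0) [task]) PySem.Dict.empty
  match PySem.List.min? start_times (fun x => x) with
  | none => []  -- min([]) raises ValueError in Python; excluded by Pre_
  | some m =>
      let fuel := start_times.length + ((start_times.foldl max m) - m).toNat + 1
      outerA fuel tasks [] m m

-- ===== PORT B =====
-- lexicographic '<' of the Python sort keys (-t[2], t[0], t[1], t[3])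
def keyLt (a b : PVTask) : Bool :=
  if a.2.2.1 ≠ b.2.2.1 then decide (b.2.2.1 < a.2.2.1)
  else if a.1 ≠ b.1 then decide (a.1 < b.1)
  else if a.2.1 ≠ b.2.1 then decide (a.2.1 < b.2.1)
  else decide (a.2.2.2 < b.2.2.2)

-- batch.sort(key=lambda t: (-t[2], t[0], t[1], t[3])): Python's stable key sort, ported as
-- stable insertion by the lexicographic tuple order (the shape of PySem.List.sorted)
def sortB (l : List PVTask) : List PVTask :=
  l.foldl (fun acc t => PySem.List.insertBy keyLt t acc) []

-- termination of the pointer sweep: the inner pointer loop consumes at least the head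
lemma pv_dropWhile_cons_length {α : Type} (p : α → Bool) (t : α) (rest : List α)
    (h : p t = true) : ((t :: rest).dropWhile p).length < (t :: rest).length := by
  simp only [List.dropWhile_cons, h, if_true, List.length_cons]
  exact Nat.lt_succ_of_le (List.length_dropWhile_le p rest)

-- Source B's 'while k < n' pointer sweep over the sorted task list: the unscanned suffix is
-- the state; the inner 'while … tasks[k][0] <= right' pointer loop is its takeWhile/
-- dropWhile split; 'result.append(t[3]); right += t[1]' is the fold over the sorted batch
def loopB (rem : List PVTask) (right : Int) (res : List Int) : List Int :=
  match rem with
  | [] => res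
  | t :: rest =>
      let r := if right < t.1 then t.1 else right
      let batch := (t :: rest).takeWhile (fun u => decide (u.1 ≤ r))
      let sb := sortB batch
      let p := sb.foldl (fun (pr : List Int × Int) u => (pr.1 ++ [u.2.2.2], pr.2 + u.2.1)) (res, r)
      loopB ((t :: rest).dropWhile (fun u => decide (u.1 ≤ r))) p.2 p.1
termination_by rem.length
decreasing_by
  exact pv_dropWhile_cons_length _ _ _ (by simp only [decide_eq_true_eq]; split <;> omega)

def get_task_sequence_alt (start_times : List Int) (durations : List Int) (priorities : List Int) : List Int :=
  let tasks := PySem.List.sorted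
      (start_times.zip (durations.zip (priorities.zip
        (PySem.List.pyRange 0 (PySem.List.len start_times))))) (fun t => t.1) false
  match tasks with
  | [] => []  -- tasks[0][0] raises IndexError in Python on an empty list; excluded by Pre_
  | t0 :: _ => loopB tasks t0.1 []

-- ===== PRECONDITION & SPEC =====
-- Pre_ excludes exactly the inputs where A raises: min([]) raises ValueError on an empty
-- start_times, and durations[i]/priorities[i] raise IndexError when shorter than start_times.
def Pre_get_task_sequence (start_times : List Int) (durations : List Int) (priorities : List Int) : Prop :=
  start_times ≠ [] ∧ start_times.length ≤ durations.length ∧ start_times.length ≤ priorities.length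

instance (start_times : List Int) (durations : List Int) (priorities : List Int) :
    Decidable (Pre_get_task_sequence start_times durations priorities) := by
  unfold Pre_get_task_sequence; infer_instance

def pvWitness_get_task_sequence : List Int × List Int × List Int :=
  ([0, 2, 0], [1, 1, 1], [1, 2, 3])

def Spec_get_task_sequence (start_times : List Int) (durations : List Int) (priorities : List Int) (out : List Int) : Prop := out = get_task_sequence_alt start_times durations priorities
instance (start_times : List Int) (durations : List Int) (priorities : List Int) (out : List Int) : Decidable (Spec_get_task_sequence start_times durations priorities out) := by unfold Spec_get_task_sequence; infer_instance

-- ===== CLAIM (what is proved, stated in full; the proofs are below) =====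
def Claim_equal_get_task_sequence : Prop := ∀ (start_times : List Int) (durations : List Int) (priorities : List Int), Dom_get_task_sequence start_times durations priorities → Pre_get_task_sequence start_times durations priorities → Spec_get_task_sequence start_times durations priorities (get_task_sequence start_times durations priorities)

-- ===== LEMMAS AND PROOFS =====

-- The two sorts are the same stable insertion: the comparator's order IS the tuple order.
lemma pv_cmp_eq_keyLt : (fun a b : PVTask => decide (comparator a b < 0)) = keyLt := by
  funext a b
  simp only [comparator, keyLt]
  split_ifs <;> simp only [decide_eq_decide] <;> omega

lemma pv_sortA_eq_sortB (l : List PVTask) : sortA l = sortB l := by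
  unfold sortA sortB
  rw [pv_cmp_eq_keyLt]

-- the append/sum fold over a batch
lemma pv_foldPR (l : List PVTask) (res : List Int) (e : Int) :
    l.foldl (fun (pr : List Int × Int) u => (pr.1 ++ [u.2.2.2], pr.2 + u.2.1)) (res, e)
      = (res ++ l.map (fun u => u.2.2.2), e + (l.map (fun u => u.2.1)).sum) := by
  induction l generalizing res e with
  | nil => simp
  | cons u t ih => simp [List.foldl_cons, ih]; ring

-- takeWhile/dropWhile of a wider window split at a narrower one (monotone thresholds)
lemma pv_take_split (l : List PVTask) (a b : Int) (hab : a ≤ b) :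
    l.takeWhile (fun u => decide (u.1 ≤ b))
      = l.takeWhile (fun u => decide (u.1 ≤ a))
        ++ (l.dropWhile (fun u => decide (u.1 ≤ a))).takeWhile (fun u => decide (u.1 ≤ b)) := by
  induction l with
  | nil => simp
  | cons u t ih =>
    by_cases h : u.1 ≤ a
    · have hb : u.1 ≤ b := le_trans h hab
      simp [List.takeWhile_cons, List.dropWhile_cons, h, hb, ih]
    · simp [List.takeWhile_cons, List.dropWhile_cons, h]

lemma pv_drop_split (l : List PVTask) (a b : Int) (hab : a ≤ b) :
    l.dropWhile (fun u => decide (u.1 ≤ b))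
      = (l.dropWhile (fun u => decide (u.1 ≤ a))).dropWhile (fun u => decide (u.1 ≤ b)) := by
  induction l with
  | nil => simp
  | cons u t ih =>
    by_cases h : u.1 ≤ a
    · have hb : u.1 ≤ b := le_trans h hab
      simp [List.dropWhile_cons, h, hb, ih]
    · simp [List.dropWhile_cons, h]

lemma pv_dropWhile_gt (l : List PVTask) (b : Int)
    (hs : l.Pairwise (fun u v => u.1 ≤ v.1)) :
    ∀ t ∈ l.dropWhile (fun u => decide (u.1 ≤ b)), b < t.1 := by
  induction l with
  | nil => simp
  | cons u t ih =>
    rw [List.pairwise_cons] at hs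
    by_cases h : u.1 ≤ b
    · simp only [List.dropWhile_cons, h, decide_true, if_true]
      exact ih hs.2
    · simp only [List.dropWhile_cons, h, decide_false, if_false]
      intro v hv
      rcases List.mem_cons.mp hv with rfl | hv'
      · omega
      · exact lt_of_lt_of_le (by omega) (hs.1 v hv')

lemma pv_filter_eq_takeWhile (l : List PVTask) (a : Int)
    (hs : l.Pairwise (fun u v => u.1 ≤ v.1)) (hlb : ∀ t ∈ l, a ≤ t.1) :
    l.filter (fun u => u.1 == a) = l.takeWhile (fun u => decide (u.1 ≤ a)) := by
  induction l with
  | nil => simp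
  | cons u t ih =>
    rw [List.pairwise_cons] at hs
    by_cases h : u.1 = a
    · have hle : u.1 ≤ a := le_of_eq h
      have hbe : (u.1 == a) = true := by simp [h]
      simp only [List.filter_cons, List.takeWhile_cons, hbe, hle, decide_true, if_true]
      exact congrArg (List.cons u) (ih hs.2 (fun v hv => hlb v (List.mem_cons_of_mem _ hv)))
    · have hgt : a < u.1 := lt_of_le_of_ne (hlb u (List.mem_cons_self)) (fun hh => h hh.symm)
      have : ¬ (u.1 ≤ a) := by omega
      simp only [List.filter_cons, List.takeWhile_cons, this, decide_false, if_false]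
      have hne : (u.1 == a) = false := by simp [h]
      simp only [hne, Bool.false_eq_true, if_false]
      apply List.filter_eq_nil_iff.mpr
      intro v hv
      have := lt_of_lt_of_le hgt (hs.1 v hv)
      simp; omega

-- stability: filtering one start-time band commutes with the sort by start time
lemma pv_filter_insertBy (x : PVTask) (acc : List PVTask) (s : Int)
    (hacc : acc.Pairwise (fun u v => u.1 ≤ v.1)) :
    (PySem.List.insertBy (fun u v => decide (u.1 < v.1)) x acc).filter (fun u => u.1 == s)
      = if x.1 = s then acc.filter (fun u => u.1 == s) ++ [x]
        else acc.filter (fun u => u.1 == s) := by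
  induction acc with
  | nil =>
    by_cases h : x.1 = s <;> simp [PySem.List.insertBy, List.filter_cons, h]
  | cons y ys ih =>
    rw [List.pairwise_cons] at hacc
    by_cases hxy : x.1 < y.1
    · simp only [PySem.List.insertBy, hxy, decide_true, if_true]
      by_cases hx : x.1 = s
      · -- all of y :: ys have key > s, so their filter is empty
        have hnil : (y :: ys).filter (fun u => u.1 == s) = [] := by
          apply List.filter_eq_nil_iff.mpr
          intro v hv
          rcases List.mem_cons.mp hv with rfl | hv'
          · simp; omega
          · have := hacc.1 v hv'
            simp; omega
        rw [if_pos hx]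
        rw [show ((x :: y :: ys).filter (fun u => u.1 == s))
            = x :: ((y :: ys).filter (fun u => u.1 == s)) from by
          simp [List.filter_cons, hx]]
        rw [hnil]
        simp
      · rw [if_neg hx]
        simp [List.filter_cons, hx]
    · simp only [PySem.List.insertBy, hxy, decide_false, Bool.false_eq_true, if_false]
      rw [List.filter_cons, List.filter_cons]
      by_cases hy : y.1 = s
      · have hby : (y.1 == s) = true := by simp [hy]
        simp only [hby, if_true]
        rw [ih hacc.2]
        by_cases hx : x.1 = s <;> simp [hx]
      · have hby : (y.1 == s) = false := by simp [hy]
        simp only [hby, Bool.false_eq_true, if_false]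
        exact ih hacc.2

lemma pv_filter_sorted (xs : List PVTask) (s : Int) :
    (PySem.List.sorted xs (fun t => t.1) false).filter (fun u => u.1 == s)
      = xs.filter (fun u => u.1 == s) := by
  induction xs using List.reverseRecOn with
  | nil => simp [PySem.List.sorted_eq_foldl_insertBy]
  | append_singleton xs x ih =>
    have h1 : PySem.List.sorted (xs ++ [x]) (fun t => t.1) false
        = PySem.List.insertBy (fun u v : PVTask => decide (u.1 < v.1)) x
            (PySem.List.sorted xs (fun t => t.1) false) := by
      rw [PySem.List.sorted_eq_foldl_insertBy, PySem.List.sorted_eq_foldl_insertBy,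
        List.foldl_append]
      rfl
    rw [h1, pv_filter_insertBy x _ s (PySem.List.sorted_pairwise xs (fun t => t.1)),
      List.filter_append]
    by_cases hx : x.1 = s
    · simp [hx, ih]
    · simp [hx, ih, List.filter_cons]

-- dict erase on the Int-keyed dict
lemma pv_get?_erase_self (d : PySem.Dict Int (List PVTask)) (k : Int) :
    (d.erase k).get? k = none := by
  simp only [PySem.Dict.get?, PySem.Dict.erase]
  rw [List.find?_eq_none.mpr]
  · rfl
  · intro p hp
    have := (List.mem_filter.mp hp).2
    simp at this ⊢
    omega

lemma pv_get?_erase_ne (d : PySem.Dict Int (List PVTask)) (k s : Int) (h : s ≠ k) :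
    (d.erase k).get? s = d.get? s := by
  simp only [PySem.Dict.get?, PySem.Dict.erase]
  congr 1
  induction d.items with
  | nil => rfl
  | cons p ps ih =>
    by_cases hpk : p.1 = k
    · have : (!p.1 == k) = false := by simp [hpk]
      rw [List.filter_cons, this]
      simp only [Bool.false_eq_true, if_false]
      rw [List.find?_cons, show (p.1 == s) = false by simp [hpk]; omega]
      exact ih
    · have : (!p.1 == k) = true := by simp [hpk]
      rw [List.filter_cons, this]
      simp only [if_true]
      rw [List.find?_cons, List.find?_cons]
      cases hps : (p.1 == s) with
      | true => rfl
      | false => exact ih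

lemma pv_contains_erase (d : PySem.Dict Int (List PVTask)) (k s : Int) :
    (d.erase k).contains s = (decide (s ≠ k) && d.contains s) := by
  simp only [PySem.Dict.contains, PySem.Dict.erase, List.any_filter]
  rw [Bool.eq_iff_iff]
  simp only [List.any_eq_true, Bool.and_eq_true, bne_iff_ne, ne_eq, beq_iff_eq,
    decide_eq_true_eq, Bool.not_eq_true']
  constructor
  · rintro ⟨p, hp, h1, h2⟩
    refine ⟨by simp_all, p, hp, h2⟩
  · rintro ⟨h1, p, hp, h2⟩
    exact ⟨p, hp, by simp_all, h2⟩

lemma pv_nodup_keys_erase (d : PySem.Dict Int (List PVTask)) (k : Int)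
    (h : d.keys.Nodup) : (d.erase k).keys.Nodup := by
  simp only [PySem.Dict.keys, PySem.Dict.erase] at *
  exact h.sublist (List.Sublist.map _ List.filter_sublist)

-- the simulation relation: dict state ↔ remaining (start-sorted) task list
def PVRel (d : PySem.Dict Int (List PVTask)) (rem : List PVTask) : Prop :=
  d.keys.Nodup
  ∧ (∀ s, d.getD s [] = rem.filter (fun u => u.1 == s))
  ∧ (∀ s, d.contains s = true ↔ s ∈ rem.map (fun u => u.1))

lemma pv_size_zero_of_rel {d : PySem.Dict Int (List PVTask)}
    (h : PVRel d []) : d.size = 0 := by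
  obtain ⟨-, -, hc⟩ := h
  have hitems : d.items = [] := by
    cases hd : d.items with
    | nil => rfl
    | cons p ps =>
      exfalso
      have : d.contains p.1 = true := by
        simp [PySem.Dict.contains, hd]
      have := (hc p.1).mp this
      simp at this
  simp [PySem.Dict.size, hitems]

lemma pv_innerA_spec : ∀ (k : Nat) (left right : Int)
    (d : PySem.Dict Int (List PVTask)) (acc : List PVTask) (rem : List PVTask),
    k = (right + 1 - left).toNat →
    PVRel d rem → rem.Pairwise (fun u v => u.1 ≤ v.1) → (∀ t ∈ rem, left ≤ t.1) →
    left ≤ right + 1 →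
    ∃ d', innerA d acc left right
        = (d', acc ++ rem.takeWhile (fun u => decide (u.1 ≤ right)), right + 1)
      ∧ PVRel d' (rem.dropWhile (fun u => decide (u.1 ≤ right))) := by
  intro k
  induction k with
  | zero =>
    intro left right d acc rem hk hrel hp hlb hle
    have hnot : ¬ (left ≤ right) := by omega
    have hlr : left = right + 1 := by omega
    have htw : rem.takeWhile (fun u => decide (u.1 ≤ right)) = [] := by
      cases rem with
      | nil => rfl
      | cons t rest =>
        have := hlb t List.mem_cons_self
        simp only [List.takeWhile_cons]
        rw [if_neg (by simp; omega)]
    have hdw : rem.dropWhile (fun u => decide (u.1 ≤ right)) = rem := by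
      cases rem with
      | nil => rfl
      | cons t rest =>
        have := hlb t List.mem_cons_self
        simp only [List.dropWhile_cons]
        rw [if_neg (by simp; omega)]
    rw [innerA, dif_neg hnot, htw, hdw]
    exact ⟨d, by simp [hlr], hrel⟩
  | succ k ih =>
    intro left right d acc rem hk hrel hp hlb hle
    have hlr : left ≤ right := by omega
    obtain ⟨hn, hg, hcont⟩ := hrel
    rw [innerA, dif_pos hlr]
    by_cases hc : d.contains left = true
    · rw [if_pos hc]
      have hgd : d.getD left []
          = rem.takeWhile (fun u => decide (u.1 ≤ left)) := by
        rw [hg left, pv_filter_eq_takeWhile rem left hp hlb]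
      have hrgt : ∀ t ∈ rem.dropWhile (fun u => decide (u.1 ≤ left)), left < t.1 :=
        pv_dropWhile_gt rem left hp
      have hrlb : ∀ t ∈ rem.dropWhile (fun u => decide (u.1 ≤ left)), left + 1 ≤ t.1 :=
        fun t ht => by have := hrgt t ht; omega
      have hrp : (rem.dropWhile (fun u => decide (u.1 ≤ left))).Pairwise
          (fun u v => u.1 ≤ v.1) := hp.sublist (List.dropWhile_sublist _)
      have hbmem : ∀ v ∈ rem.takeWhile (fun u => decide (u.1 ≤ left)), v.1 = left := by
        intro v hv
        have h1 := List.mem_takeWhile_imp hv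
        have h2 : v ∈ rem := (List.takeWhile_sublist _).mem hv
        have := hlb v h2
        simp at h1
        omega
      have hrel' : PVRel (d.erase left) (rem.dropWhile (fun u => decide (u.1 ≤ left))) := by
        refine ⟨pv_nodup_keys_erase d left hn, ?_, ?_⟩
        · intro s
          by_cases hs : s = left
          · subst hs
            rw [PySem.Dict.getD, pv_get?_erase_self]
            symm
            apply List.filter_eq_nil_iff.mpr
            intro v hv
            have := hrgt v hv
            simp
            omega
          · have e1 : (d.erase left).getD s [] = d.getD s [] := by
              simp only [PySem.Dict.getD, pv_get?_erase_ne d left s hs]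
            rw [e1, hg s]
            conv_lhs => rw [← List.takeWhile_append_dropWhile
              (p := fun u : PVTask => decide (u.1 ≤ left)) (l := rem)]
            rw [List.filter_append]
            have : (rem.takeWhile (fun u => decide (u.1 ≤ left))).filter
                (fun u => u.1 == s) = [] := by
              apply List.filter_eq_nil_iff.mpr
              intro v hv
              have := hbmem v hv
              simp
              omega
            rw [this, List.nil_append]
        · intro s
          rw [pv_contains_erase]
          by_cases hs : s = left
          · subst hs
            simp only [ne_eq, not_true_eq_false, decide_false, Bool.false_and,
              Bool.false_eq_true, false_iff]
            intro hmem
            obtain ⟨v, hv, hvs⟩ := List.mem_map.mp hmem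
            have := hrgt v hv
            omega
          · simp only [ne_eq, hs, not_false_eq_true, decide_true, Bool.true_and]
            rw [hcont s]
            conv_lhs => rw [← List.takeWhile_append_dropWhile
              (p := fun u : PVTask => decide (u.1 ≤ left)) (l := rem)]
            rw [List.map_append, List.mem_append]
            constructor
            · rintro (hmem | hmem)
              · exfalso
                obtain ⟨v, hv, hvs⟩ := List.mem_map.mp hmem
                exact hs ((hbmem v hv) ▸ hvs).symm
              · exact hmem
            · exact fun hmem => Or.inr hmem
      obtain ⟨d', heq, hrel''⟩ := ih (left + 1) right (d.erase left)
        (acc ++ d.getD left []) (rem.dropWhile (fun u => decide (u.1 ≤ left)))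
        (by omega) hrel' hrp hrlb (by omega)
      refine ⟨d', ?_, ?_⟩
      · rw [heq, hgd, pv_take_split rem left right hlr, ← List.append_assoc]
      · rw [pv_drop_split rem left right hlr]
        exact hrel''
    · rw [if_neg hc]
      have hlb' : ∀ t ∈ rem, left + 1 ≤ t.1 := by
        intro t ht
        have h1 := hlb t ht
        rcases lt_or_eq_of_le h1 with h2 | h2
        · omega
        · exfalso
          apply hc
          rw [hcont left]
          exact List.mem_map.mpr ⟨t, ht, h2.symm⟩
      exact ih (left + 1) right d acc rem (by omega) ⟨hn, hg, hcont⟩ hp hlb' (by omega)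

lemma pv_loopB_clamp (rem : List PVTask) (r1 r2 : Int) (res : List Int)
    (h : ∀ t rest, rem = t :: rest → r1 ≤ t.1 ∧ r2 ≤ t.1) :
    loopB rem r1 res = loopB rem r2 res := by
  cases rem with
  | nil => rw [loopB, loopB]
  | cons t rest =>
    obtain ⟨h1, h2⟩ := h t rest rfl
    rw [loopB, loopB]
    have e1 : (if r1 < t.1 then t.1 else r1) = t.1 := by split <;> omega
    have e2 : (if r2 < t.1 then t.1 else r2) = t.1 := by split <;> omega
    simp only [e1, e2]

-- the main simulation: one batch step of A (plus its empty creep steps) is one step of B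
lemma pv_main : ∀ (fuel : Nat) (rem : List PVTask) (d : PySem.Dict Int (List PVTask))
    (res : List Int) (left right M : Int),
    PVRel d rem → rem.Pairwise (fun u v => u.1 ≤ v.1) → (∀ t ∈ rem, left ≤ t.1) →
    (∀ t ∈ rem, t.1 ≤ M) → left ≤ right + 1 →
    fuel ≥ rem.length + (M - right).toNat + 1 →
    outerA fuel d res left right = loopB rem right res := by
  intro fuel
  induction fuel with
  | zero =>
    intro rem d res left right M _ _ _ _ _ hf
    exact absurd hf (by omega)
  | succ f ih =>
    intro rem d res left right M hrel hp hlb hub hle hf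
    cases rem with
    | nil =>
      have hs := pv_size_zero_of_rel hrel
      rw [outerA, if_neg (by omega), loopB]
    | cons t rest =>
      have hsz : d.size ≠ 0 := by
        have hct : d.contains t.1 = true :=
          (hrel.2.2 t.1).mpr (List.mem_map.mpr ⟨t, List.mem_cons_self, rfl⟩)
        intro h0
        have hnil : d.items = [] := List.eq_nil_of_length_eq_zero h0
        rw [PySem.Dict.contains, hnil] at hct
        simp at hct
      obtain ⟨d', heq, hrel'⟩ := pv_innerA_spec ((right + 1 - left).toNat) left right d []
        (t :: rest) rfl hrel hp hlb hle
      rw [outerA, if_pos hsz]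
      simp only [heq, List.nil_append, pv_sortA_eq_sortB, pv_foldPR]
      have hgt : ∀ u ∈ (t :: rest).dropWhile (fun u => decide (u.1 ≤ right)), right < u.1 :=
        pv_dropWhile_gt (t :: rest) right hp
      have hp' : ((t :: rest).dropWhile (fun u => decide (u.1 ≤ right))).Pairwise
          (fun u v => u.1 ≤ v.1) := hp.sublist (List.dropWhile_sublist _)
      have hub' : ∀ u ∈ (t :: rest).dropWhile (fun u => decide (u.1 ≤ right)), u.1 ≤ M :=
        fun u hu => hub u ((List.dropWhile_sublist _).mem hu)
      have hlen : (t :: rest).length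
          = ((t :: rest).takeWhile (fun u => decide (u.1 ≤ right))).length
            + ((t :: rest).dropWhile (fun u => decide (u.1 ≤ right))).length := by
        conv_lhs => rw [← List.takeWhile_append_dropWhile
          (p := fun u : PVTask => decide (u.1 ≤ right)) (l := t :: rest)]
        rw [List.length_append]
      by_cases hbatch : t.1 ≤ right
      · have htw : (t :: rest).takeWhile (fun u => decide (u.1 ≤ right))
            = t :: rest.takeWhile (fun u => decide (u.1 ≤ right)) := by
          simp [hbatch]
        have hM : t.1 ≤ M := hub t List.mem_cons_self
        -- the common batch data
        set tw := (t :: rest).takeWhile (fun u => decide (u.1 ≤ right)) with htwdef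
        set rest' := (t :: rest).dropWhile (fun u => decide (u.1 ≤ right)) with hrestdef
        set S := ((sortB tw).map (fun u => u.2.1)).sum with hSdef
        set P1 := res ++ (sortB tw).map (fun u => u.2.2.2) with hP1def
        have hR : right + 1 ≤ (if right + (0 + S) < right + 1 then right + 1 else right + (0 + S)) := by
          split <;> omega
        have hstep : outerA f d' P1 (right + 1)
              (if right + (0 + S) < right + 1 then right + 1 else right + (0 + S))
            = loopB rest' (if right + (0 + S) < right + 1 then right + 1 else right + (0 + S)) P1 := by
          apply ih rest' d' P1 (right + 1) _ M hrel' hp'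
            (fun u hu => by have := hgt u hu; omega) hub' (by omega)
          have h1 : tw.length ≥ 1 := by rw [htw]; simp
          have h2 : ((M - (if right + (0 + S) < right + 1 then right + 1 else right + (0 + S))).toNat)
              ≤ (M - right).toNat := by split <;> omega
          omega
        rw [hstep]
        -- B side
        rw [loopB]
        have e1 : (if right < t.1 then t.1 else right) = right := by split <;> omega
        simp only [e1, ← htwdef, pv_foldPR, ← hSdef, ← hP1def, ← hrestdef]
        by_cases hS : right + (0 + S) < right + 1
        · rw [if_pos hS]
          apply pv_loopB_clamp
          intro u rr hurr
          have hu : u ∈ rest' := by rw [hurr]; exact List.mem_cons_self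
          have := hgt u hu
          omega
        · rw [if_neg hS]
          have : right + (0 + S) = right + S := by omega
          rw [this]
      · have htw : (t :: rest).takeWhile (fun u => decide (u.1 ≤ right)) = [] := by
          simp only [List.takeWhile_cons]
          rw [if_neg (by simp; omega)]
        have hdw : (t :: rest).dropWhile (fun u => decide (u.1 ≤ right)) = t :: rest := by
          simp only [List.dropWhile_cons]
          rw [if_neg (by simp; omega)]
        rw [hdw] at hrel' hgt
        rw [htw]
        have hsort : sortB [] = [] := rfl
        simp only [hsort, List.map_nil, List.sum_nil, add_zero,
          List.append_nil]
        have e2 : (if right < right + 1 then right + 1 else right) = right + 1 := by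
          split <;> omega
        rw [e2]
        have hM : t.1 ≤ M := hub t List.mem_cons_self
        have hstep : outerA f d' res (right + 1) (right + 1) = loopB (t :: rest) (right + 1) res := by
          apply ih (t :: rest) d' res (right + 1) (right + 1) M hrel' hp
            (fun u hu => by have := hgt u hu; omega) hub (by omega)
          omega
        rw [hstep]
        apply pv_loopB_clamp
        intro u rr hurr
        have h1 : t = u := by injection hurr
        subst h1
        constructor <;> omega

theorem pv_spec_aux (start_times durations priorities : List Int)
    (hpre : Pre_get_task_sequence start_times durations priorities) :
    get_task_sequence start_times durations priorities
      = get_task_sequence_alt start_times durations priorities := by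
  obtain ⟨hne, hdu, hpr⟩ := hpre
  obtain ⟨m, hm⟩ : ∃ m, PySem.List.min? start_times (fun x => x) = some m := by
    cases h : PySem.List.min? start_times (fun x => x) with
    | none => exact absurd ((PySem.List.min?_eq_none_iff _ _).mp h) hne
    | some m => exact ⟨m, rfl⟩
  -- the task list in index order and its stable sort by start time
  set TL : List PVTask := (PySem.List.pyRange 0 (PySem.List.len start_times)).map
    (fun i => ((PySem.List.pyGetD start_times i 0),
      (PySem.List.pyGetD durations i 0, (PySem.List.pyGetD priorities i 0, i)))) with hTL
  set rem0 : List PVTask := PySem.List.sorted TL (fun t => t.1) false with hrem0def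
  -- the A-side dict build is a modify-fold over TL
  have hfun : (fun (d : PySem.Dict Int (List PVTask)) (t : PVTask) =>
        if d.contains t.1 then d.modify t.1 [] (fun l => l ++ [t]) else d.insert t.1 [t])
      = fun d t => d.modify t.1 [] (fun l => l ++ [t]) := by
    funext d t
    by_cases hc : d.contains t.1 = true
    · rw [if_pos hc]
    · rw [if_neg hc, PySem.Dict.modify,
        PySem.Dict.getD_of_not_contains d [] (by simpa using hc), List.nil_append]
  set d0 := TL.foldl (fun d t => d.modify t.1 [] (fun l => l ++ [t])) PySem.Dict.empty with hd0
  -- characterise d0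
  have hgetD : ∀ s, d0.getD s [] = TL.filter (fun u => u.1 == s) := by
    intro s
    have h := PySem.Dict.getD_foldl_modify_append
      (TL.map (fun t => ((t.1 : Int), t))) PySem.Dict.empty s
    rw [List.foldl_map] at h
    simpa [Function.comp_def, List.filter_map, List.map_map, PySem.Dict.getD_empty] using h
  have hnodup : d0.keys.Nodup :=
    PySem.Dict.nodup_keys_foldl_modify_key TL (fun t => t.1) []
      (fun _ t => fun l => l ++ [t]) PySem.Dict.empty PySem.Dict.nodup_keys_empty
  have hkeys : d0.keys = PySem.Set.update PySem.Dict.empty.keys (TL.map (fun t => t.1)) :=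
    PySem.Dict.keys_foldl_modify_key TL (fun t => t.1) []
      (fun _ t => fun l => l ++ [t]) PySem.Dict.empty
  have hcont : ∀ s, d0.contains s = true ↔ s ∈ TL.map (fun u => u.1) := by
    intro s
    rw [PySem.Dict.contains_iff_mem_keys, hkeys, PySem.Set.mem_update]
    simp [PySem.Dict.keys_empty]
  have hrel0 : PVRel d0 rem0 := by
    refine ⟨hnodup, ?_, ?_⟩
    · intro s
      rw [hgetD s, hrem0def, pv_filter_sorted TL s]
    · intro s
      rw [hcont s]
      simp only [List.mem_map, hrem0def]
      constructor
      · rintro ⟨t, ht, rfl⟩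
        exact ⟨t, (PySem.List.mem_sorted TL (fun t => t.1) false t).mpr ht, rfl⟩
      · rintro ⟨t, ht, rfl⟩
        exact ⟨t, (PySem.List.mem_sorted TL (fun t => t.1) false t).mp ht, rfl⟩
  have hTL1 : TL.map (fun u => u.1) = start_times := by
    rw [hTL, List.map_map]
    exact PySem.List.map_pyGetD_pyRange_zero start_times 0
  have hmemst : ∀ t ∈ rem0, t.1 ∈ start_times := by
    intro t ht
    rw [← hTL1]
    exact List.mem_map.mpr ⟨t, (PySem.List.mem_sorted TL (fun t => t.1) false t).mp ht, rfl⟩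
  have hlb0 : ∀ t ∈ rem0, m ≤ t.1 :=
    fun t ht => PySem.List.min?_isMin hm t.1 (hmemst t ht)
  have hub0 : ∀ t ∈ rem0, t.1 ≤ start_times.foldl max m :=
    fun t ht => (PySem.List.le_foldl_max start_times m).2 t.1 (hmemst t ht)
  have hlen0 : rem0.length = start_times.length := by
    rw [hrem0def, PySem.List.length_sorted, hTL]
    simp [PySem.List.length_pyRange_one, PySem.List.len]
  -- A side reduces to the abstract sweep
  have hA : get_task_sequence start_times durations priorities
      = loopB rem0 m [] := by
    have hfold : d0 = (PySem.List.pyRange 0 (PySem.List.len start_times)).foldl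
        (fun d i =>
          let task : PVTask := ((PySem.List.pyGetD start_times i 0),
            (PySem.List.pyGetD durations i 0, (PySem.List.pyGetD priorities i 0, i)))
          if d.contains (PySem.List.pyGetD start_times i 0) then
            d.modify (PySem.List.pyGetD start_times i 0) [] (fun l => l ++ [task])
          else d.insert (PySem.List.pyGetD start_times i 0) [task]) PySem.Dict.empty := by
      rw [hd0, hTL, List.foldl_map]
      congr 1
      funext d i
      by_cases hc : d.contains (PySem.List.pyGetD start_times i 0) = true
      · simp only [if_pos hc]
      · simp only [if_neg hc]
        rw [PySem.Dict.modify,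
          PySem.Dict.getD_of_not_contains d [] (by simpa using hc), List.nil_append]
    simp only [get_task_sequence, hm, ← hfold]
    exact pv_main (start_times.length + ((start_times.foldl max m) - m).toNat + 1)
      rem0 d0 [] m m (start_times.foldl max m) hrel0
      (PySem.List.sorted_pairwise TL (fun t => t.1)) hlb0 hub0 (by omega) (by omega)
  -- B side: the zip is TL
  have hzip : start_times.zip (durations.zip (priorities.zip
      (PySem.List.pyRange 0 (PySem.List.len start_times)))) = TL := by
    apply List.ext_getElem
    · simp [List.length_zip, PySem.List.length_pyRange_one, PySem.List.len, hTL]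
      omega
    · intro i h1 h2
      have hi : i < start_times.length := by
        simp [List.length_zip, PySem.List.length_pyRange_one, PySem.List.len] at h1
        omega
      have hrange : (PySem.List.pyRange 0 (PySem.List.len start_times))[i]'(by
          simp [PySem.List.length_pyRange_one, PySem.List.len]; omega) = (i : Int) := by
        rw [PySem.List.getElem_pyRange_one 0 (PySem.List.len start_times) i]
        omega
      simp only [List.getElem_zip, hTL, List.getElem_map, hrange]
      have hget : ∀ (xs : List Int) (hx : i < xs.length),
          PySem.List.pyGetD xs (i : Int) 0 = xs[i]'hx := by
        intro xs hx
        rw [PySem.List.pyGetD_natCast]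
        exact List.getD_eq_getElem xs 0 hx
      rw [hget start_times hi, hget durations (by omega), hget priorities (by omega)]
  have hrem0ne : rem0 ≠ [] := by
    rw [hrem0def, ne_eq, PySem.List.sorted_eq_nil_iff]
    intro h
    apply hne
    have := congrArg List.length h
    rw [hTL] at this
    simp [PySem.List.length_pyRange_one, PySem.List.len] at this
    exact this
  obtain ⟨t0, rest0, hr0⟩ : ∃ t0 rest0, rem0 = t0 :: rest0 := by
    cases h : rem0 with
    | nil => exact absurd h hrem0ne
    | cons a b => exact ⟨a, b, rfl⟩
  have hB : get_task_sequence_alt start_times durations priorities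
      = loopB rem0 t0.1 [] := by
    rw [get_task_sequence_alt]
    rw [hzip, ← hrem0def, hr0]
  rw [hA, hB]
  apply pv_loopB_clamp
  intro u rr hurr
  have h1 : t0 = u := by rw [hr0] at hurr; injection hurr
  subst h1
  exact ⟨hlb0 t0 (by rw [hr0]; exact List.mem_cons_self), le_refl _⟩

-- ===== VERDICT (by name: the statement is the Claim_ definition above) =====
theorem get_task_sequence_spec : Claim_equal_get_task_sequence := by
  intro st du pr _ hpre
  unfold Spec_get_task_sequence
  exact pv_spec_aux st du pr hpre
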